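-- pv_equiv track=rewrite | github.com/Liam-1992/Brainrot_Shorts | app/captions_report.py | _max_consecutive_long
-- ===== SOURCE A (Python) =====
-- from typing import Dict, List
--
-- def _max_consecutive_long(beats: List[Dict]) -> int:
--     max_run = 0
--     current = 0
--     for beat in beats:
--         text = str(beat.get("text", "")).strip()
--         if len(text.split()) >= 9:
--             current += 1
--             max_run = max(max_run, current)
--         else:
--             current = 0
--     return max_run
-- ===== SOURCE B (Python) =====
-- from itertools import groupby
-- from typing import Dict, List
--
--
-- def _is_long(beat: Dict) -> bool:
--     return len(str(beat.get("text", "")).strip().split()) >= 9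
--
--
-- def _max_consecutive_long(beats: List[Dict]) -> int:
--     return max((sum(1 for _ in grp)
--                 for key, grp in groupby(map(_is_long, beats)) if key),
--                default=0)
-- ===== Notes on version B (the rewrite author's own statement) =====
-- stated objective: idiomatic
-- what changed: Replaces the running-counter/running-max loop with a declarative pipeline: map the >=9-words predicate over the beats, group consecutive equal flags with itertools.groupby, and take the max of the True-group lengths with default 0.
import Mathlib
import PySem

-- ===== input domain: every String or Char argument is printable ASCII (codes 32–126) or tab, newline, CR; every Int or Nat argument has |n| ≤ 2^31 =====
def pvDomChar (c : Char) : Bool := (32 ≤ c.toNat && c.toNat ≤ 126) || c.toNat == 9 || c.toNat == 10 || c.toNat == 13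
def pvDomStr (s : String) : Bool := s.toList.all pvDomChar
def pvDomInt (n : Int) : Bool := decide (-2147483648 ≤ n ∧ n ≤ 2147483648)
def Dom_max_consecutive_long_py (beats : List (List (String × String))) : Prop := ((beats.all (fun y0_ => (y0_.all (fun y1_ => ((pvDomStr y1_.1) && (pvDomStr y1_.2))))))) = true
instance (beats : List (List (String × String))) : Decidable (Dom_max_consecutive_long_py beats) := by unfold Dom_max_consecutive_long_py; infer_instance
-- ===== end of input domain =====

-- B replaces A's running-counter loop with a predicate map + groupby pipeline (idiomatic; same cost).

-- ===== PORT A =====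
-- literal port of A: single fold carrying (max_run, current)
def max_consecutive_long_py (beats : List (List (String × String))) : Int :=
  (beats.foldl
    (fun (st : Int × Int) beat =>
      let text := PySem.Str.strip ((PySem.Dict.mk beat).getD "text" "")
      if 9 ≤ (PySem.Str.split₀ text).length then
        (max st.1 (st.2 + 1), st.2 + 1)
      else
        (st.1, 0))
    (0, 0)).1

-- ===== PORT B =====
-- Source B's _is_long(beat)
def pvIsLong (beat : List (String × String)) : Bool :=
  decide (9 ≤ (PySem.Str.split₀ (PySem.Str.strip ((PySem.Dict.mk beat).getD "text" ""))).length)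

-- groupby machinery: take the leading run equal to b (length, remainder)
def pvTakeRun (b : Bool) : List Bool → Nat × List Bool
  | [] => (0, [])
  | c :: cs => if c == b then ((pvTakeRun b cs).1 + 1, (pvTakeRun b cs).2) else (0, c :: cs)

theorem pvTakeRun_snd_le (b : Bool) : ∀ bs : List Bool, (pvTakeRun b bs).2.length ≤ bs.length := by
  intro bs
  induction bs with
  | nil => simp [pvTakeRun]
  | cons c cs ih =>
    by_cases h : c == b <;> simp [pvTakeRun, h] <;> omega

-- itertools.groupby over a list of flags: (key, group length) pairs
def pvGroups : List Bool → List (Bool × Nat)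
  | [] => []
  | b :: bs => (b, (pvTakeRun b bs).1 + 1) :: pvGroups (pvTakeRun b bs).2
  termination_by l => l.length
  decreasing_by simpa [Nat.lt_succ_iff] using pvTakeRun_snd_le b bs

-- max(.., default=0) over the lengths of the True groups
def max_consecutive_long_py_alt (beats : List (List (String × String))) : Int :=
  Int.ofNat
    ((((pvGroups (beats.map pvIsLong)).filter (fun g => g.1)).map (fun g => g.2)).foldl
      Nat.max 0)

-- ===== PRECONDITION & SPEC =====
def Spec_max_consecutive_long_py (beats : List (List (String × String))) (out : Int) : Prop := out = max_consecutive_long_py_alt beats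
instance (beats : List (List (String × String))) (out : Int) : Decidable (Spec_max_consecutive_long_py beats out) := by unfold Spec_max_consecutive_long_py; infer_instance

-- ===== CLAIM (what is proved, stated in full; the proofs are below) =====
def Claim_equal_max_consecutive_long_py : Prop := ∀ (beats : List (List (String × String))), Dom_max_consecutive_long_py beats → Spec_max_consecutive_long_py beats (max_consecutive_long_py beats)

-- ===== LEMMAS AND PROOFS =====

-- the best (recorded-from-now-on) run length, given an ongoing run of length c
def pvBest : Nat → List Bool → Nat
  | _, [] => 0
  | c, true :: bs => Nat.max (c + 1) (pvBest (c + 1) bs)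
  | _, false :: bs => pvBest 0 bs

theorem pvFoldA_eq_best (flags : List Bool) : ∀ (m c : Nat),
    (flags.foldl
      (fun (st : Int × Int) b => if b then (max st.1 (st.2 + 1), st.2 + 1) else (st.1, 0))
      ((m : Int), (c : Int))).1 = ((Nat.max m (pvBest c flags) : Nat) : Int) := by
  induction flags with
  | nil => intro m c; simp [pvBest]
  | cons b bs ih =>
    intro m c
    cases b with
    | true =>
      have h1 : (max (m : Int) ((c : Int) + 1), (c : Int) + 1)
          = (((Nat.max m (c + 1) : Nat) : Int), ((c + 1 : Nat) : Int)) := by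
        push_cast; simp
      simp only [List.foldl_cons, if_true]
      rw [h1, ih]
      congr 1
      simp [pvBest, Nat.max_assoc]
    | false =>
      simp only [List.foldl_cons, Bool.false_eq_true, if_false]
      have h2 := ih m 0
      simp only [Nat.cast_zero] at h2
      rw [h2]
      simp [pvBest]

theorem pvBest_const_of_takeRun_true : ∀ (bs : List Bool) (n : Nat) (rest : List Bool),
    pvTakeRun true bs = (n, rest) → ∀ x y, pvBest x rest = pvBest y rest := by
  intro bs
  induction bs with
  | nil => intro n rest h x y; simp [pvTakeRun] at h; rw [h.2]; rfl
  | cons c cs ih =>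
    intro n rest h x y
    cases c with
    | true =>
      simp [pvTakeRun] at h
      exact ih (pvTakeRun true cs).1 rest (by simp [← h.2]) x y
    | false =>
      simp [pvTakeRun] at h
      rw [← h.2]; simp [pvBest]

theorem pvBest_true_run : ∀ (bs : List Bool) (c n : Nat) (rest : List Bool),
    pvTakeRun true bs = (n, rest) →
    pvBest c (true :: bs) = Nat.max (c + 1 + n) (pvBest (c + 1 + n) rest) := by
  intro bs
  induction bs with
  | nil =>
    intro c n rest h; simp [pvTakeRun] at h
    rw [← h.1, h.2]
    simp [pvBest]
  | cons b bs' ih =>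
    intro c n rest h
    cases b with
    | true =>
      simp [pvTakeRun] at h
      obtain ⟨h1, h2⟩ := h
      have := ih (c + 1) (pvTakeRun true bs').1 (pvTakeRun true bs').2 rfl
      show Nat.max (c + 1) (pvBest (c + 1) (true :: bs')) = _
      rw [this, ← h1, ← h2]
      have hc := pvBest_const_of_takeRun_true bs' _ _ rfl
          (c + 1 + 1 + (pvTakeRun true bs').1) (c + 1 + ((pvTakeRun true bs').1 + 1))
      rw [hc]
      have harith : c + 1 + 1 + (pvTakeRun true bs').1 = c + 1 + ((pvTakeRun true bs').1 + 1) := by omega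
      rw [harith]
      simp only [Nat.max_def]
      split_ifs <;> omega
    | false =>
      simp [pvTakeRun] at h
      rw [← h.1, ← h.2]
      show Nat.max (c + 1) (pvBest (c + 1) (false :: bs')) = _
      simp [pvBest]
  termination_by bs => bs.length

theorem pvBest_false_run : ∀ (bs : List Bool) (n : Nat) (rest : List Bool),
    pvTakeRun false bs = (n, rest) → pvBest 0 bs = pvBest 0 rest := by
  intro bs
  induction bs with
  | nil => intro n rest h; simp [pvTakeRun] at h; rw [← h.2]
  | cons c cs ih =>
    intro n rest h
    cases c with
    | true => simp [pvTakeRun] at h; rw [← h.2]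
    | false =>
      simp [pvTakeRun] at h
      have := ih (pvTakeRun false cs).1 (pvTakeRun false cs).2 rfl
      rw [← h.2]
      simpa [pvBest] using this

theorem pvFoldlMax (l : List Nat) : ∀ a : Nat, l.foldl Nat.max a = Nat.max a (l.foldl Nat.max 0) := by
  induction l with
  | nil => intro a; simp
  | cons x l ih =>
    intro a
    simp only [List.foldl_cons]
    rw [ih (Nat.max a x), ih (Nat.max 0 x)]
    simp only [Nat.max_def]
    split_ifs <;> omega

theorem pvBest_eq_groups : ∀ (k : Nat) (flags : List Bool), flags.length ≤ k →
    pvBest 0 flags = (((pvGroups flags).filter (fun g => g.1)).map (fun g => g.2)).foldl Nat.max 0 := by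
  intro k
  induction k with
  | zero =>
    intro flags h
    have : flags = [] := List.eq_nil_of_length_eq_zero (Nat.le_zero.mp h)
    subst this; simp [pvBest, pvGroups]
  | succ k ih =>
    intro flags h
    cases flags with
    | nil => simp [pvBest, pvGroups]
    | cons b bs =>
      have hlen : (pvTakeRun b bs).2.length ≤ k := by
        have := pvTakeRun_snd_le b bs
        simp at h; omega
      cases b with
      | true =>
        rw [pvBest_true_run bs 0 (pvTakeRun true bs).1 (pvTakeRun true bs).2 rfl]
        rw [pvBest_const_of_takeRun_true bs _ _ rfl (0 + 1 + (pvTakeRun true bs).1) 0]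
        rw [ih _ hlen]
        rw [pvGroups]
        simp only [List.filter_cons, decide_true, if_true, List.map_cons, List.foldl_cons, Nat.zero_max]
        rw [pvFoldlMax _ ((pvTakeRun true bs).1 + 1)]
        congr 1
        omega
      | false =>
        rw [pvBest]
        rw [pvBest_false_run bs _ _ rfl]
        rw [ih _ hlen]
        rw [pvGroups]
        simp

theorem pvStep_eq (beat : List (String × String)) (st : Int × Int) :
    (let text := PySem.Str.strip ((PySem.Dict.mk beat).getD "text" "")
     if 9 ≤ (PySem.Str.split₀ text).length then (max st.1 (st.2 + 1), st.2 + 1)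
     else (st.1, (0 : Int)))
    = if pvIsLong beat then (max st.1 (st.2 + 1), st.2 + 1) else (st.1, 0) := by
  by_cases h : 9 ≤ (PySem.Str.split₀ (PySem.Str.strip ((PySem.Dict.mk beat).getD "text" ""))).length
  · simp only [pvIsLong, h, if_true, decide_true]
  · simp only [pvIsLong, h, decide_false, Bool.false_eq_true, if_false]

theorem pvFoldA_over_beats (beats : List (List (String × String))) : ∀ (st : Int × Int),
    beats.foldl
      (fun (st : Int × Int) beat =>
        let text := PySem.Str.strip ((PySem.Dict.mk beat).getD "text" "")
        if 9 ≤ (PySem.Str.split₀ text).length then (max st.1 (st.2 + 1), st.2 + 1)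
        else (st.1, 0)) st
    = (beats.map pvIsLong).foldl
      (fun (st : Int × Int) b => if b then (max st.1 (st.2 + 1), st.2 + 1) else (st.1, 0)) st := by
  induction beats with
  | nil => intro st; rfl
  | cons beat bs ih =>
    intro st
    simp only [List.foldl_cons, List.map_cons]
    rw [pvStep_eq beat st, ih]

-- ===== VERDICT (by name: the statement is the Claim_ definition above) =====
theorem max_consecutive_long_py_spec : Claim_equal_max_consecutive_long_py := by
  intro beats _
  unfold Spec_max_consecutive_long_py max_consecutive_long_py max_consecutive_long_py_alt
  rw [pvFoldA_over_beats beats (0, 0)]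
  have h0 : ((0 : Int), (0 : Int)) = (((0 : Nat) : Int), ((0 : Nat) : Int)) := by simp
  rw [h0, pvFoldA_eq_best (beats.map pvIsLong) 0 0]
  rw [pvBest_eq_groups (beats.map pvIsLong).length _ le_rfl]
  simp [Int.ofNat_eq_natCast]
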